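-- pv_equiv track=rewrite | github.com/minarth/advent-of-code | 2015/20/20.py | _calculate_limited_presents
-- ===== SOURCE A (Python) =====
-- from math import sqrt, floor
--
-- def _calculate_limited_presents(house):
--     presents = 0
--     for i in range(1, floor(sqrt(house))+1):
--         if house % i == 0 and house // i <= 50:
--             presents += i*11
--         if house % i == 0 and i != sqrt(house) and i <= 50:
--             presents += (house // i)*11
--
--     return presents
-- ===== SOURCE B (Python) =====
-- def _calculate_limited_presents(house):
--     presents = 0
--     for cofactor in range(1, 51):
--         if house % cofactor == 0:
--             presents += (house // cofactor) * 11
--     return presents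
-- ===== Notes on version B (the rewrite author's own statement) =====
-- stated objective: faster
-- what changed: B iterates candidate cofactors 1..50 directly and adds (house // c) * 11 for each divisor c, instead of enumerating divisor pairs up to sqrt(house), making the work a constant 50 iterations independent of house.
import Mathlib
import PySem

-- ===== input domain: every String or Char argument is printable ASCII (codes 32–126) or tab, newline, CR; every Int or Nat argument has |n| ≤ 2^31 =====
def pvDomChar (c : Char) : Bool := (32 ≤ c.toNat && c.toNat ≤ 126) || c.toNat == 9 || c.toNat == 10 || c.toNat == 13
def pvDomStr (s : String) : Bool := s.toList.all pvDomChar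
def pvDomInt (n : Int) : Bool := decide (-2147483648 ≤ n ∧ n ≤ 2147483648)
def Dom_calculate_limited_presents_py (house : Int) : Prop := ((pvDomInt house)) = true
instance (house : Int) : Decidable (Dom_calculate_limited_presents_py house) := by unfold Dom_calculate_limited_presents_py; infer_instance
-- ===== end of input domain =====

-- B replaces A's divisor-pair scan up to sqrt(house) by a direct loop over the 50 candidate cofactors,
-- a constant number of iterations by inspection (timing unmeasured here). Negative house (A raises ValueError) is outside Pre_.

-- ===== PORT A =====
-- math.sqrt on 0 ≤ house ≤ 2^31 is exact enough that floor(sqrt(house)) = Nat.sqrt house.toNat and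
-- `i != sqrt(house)` for the integer loop index i is exactly `i * i ≠ house`; on house < 0 math.sqrt
-- raises ValueError (excluded by Pre_).
def calculate_limited_presents_py (house : Int) : Int :=
  (PySem.List.pyRange 1 (((Nat.sqrt house.toNat : Nat) : Int) + 1) 1).foldl
    (fun presents i =>
      let presents := if PySem.Int.mod house i = 0 ∧ PySem.Int.floordiv house i ≤ 50
                      then presents + i * 11 else presents
      if PySem.Int.mod house i = 0 ∧ i * i ≠ house ∧ i ≤ 50
      then presents + PySem.Int.floordiv house i * 11 else presents)
    0

-- ===== PORT B =====
def calculate_limited_presents_py_alt (house : Int) : Int :=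
  (PySem.List.pyRange 1 51 1).foldl
    (fun presents cofactor =>
      if PySem.Int.mod house cofactor = 0
      then presents + PySem.Int.floordiv house cofactor * 11 else presents)
    0

-- ===== PRECONDITION & SPEC =====
-- Pre_ excludes exactly house < 0, where A raises ValueError (math.sqrt of a negative number).
def Pre_calculate_limited_presents_py (house : Int) : Prop := 0 ≤ house
instance (house : Int) : Decidable (Pre_calculate_limited_presents_py house) := by unfold Pre_calculate_limited_presents_py; infer_instance
def pvWitness_calculate_limited_presents_py : Int := 12

def Spec_calculate_limited_presents_py (house : Int) (out : Int) : Prop := out = calculate_limited_presents_py_alt house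
instance (house : Int) (out : Int) : Decidable (Spec_calculate_limited_presents_py house out) := by unfold Spec_calculate_limited_presents_py; infer_instance

-- ===== CLAIM (what is proved, stated in full; the proofs are below) =====
def Claim_equal_calculate_limited_presents_py : Prop := ∀ (house : Int), Dom_calculate_limited_presents_py house → Pre_calculate_limited_presents_py house → Spec_calculate_limited_presents_py house (calculate_limited_presents_py house)
-- ===== LEMMAS AND PROOFS =====

-- the per-index contribution of A's loop, phrased over ℕ
def pvTermA (n i : Nat) : Int :=
  (if i ∣ n ∧ n / i ≤ 50 then (i : Int) * 11 else 0) +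
  (if i ∣ n ∧ i * i ≠ n ∧ i ≤ 50 then ((n / i : Nat) : Int) * 11 else 0)

-- the per-cofactor contribution of B's loop, phrased over ℕ
def pvTermB (n c : Nat) : Int := if c ∣ n then ((n / c : Nat) : Int) * 11 else 0

lemma pvCondCast (n i : Nat) :
    (PySem.Int.mod (n : Int) (i : Int) = 0 ↔ i ∣ n) ∧
    PySem.Int.floordiv (n : Int) (i : Int) = ((n / i : Nat) : Int) := by
  refine ⟨?_, PySem.Int.floordiv_natCast n i⟩
  rw [PySem.Int.mod_eq_zero_iff_dvd]; exact Int.natCast_dvd_natCast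

lemma pvTermA_cast (n i : Nat) :
    (if PySem.Int.mod (n : Int) (i : Int) = 0 ∧ PySem.Int.floordiv (n : Int) (i : Int) ≤ 50
     then (i : Int) * 11 else 0) +
    (if PySem.Int.mod (n : Int) (i : Int) = 0 ∧ (i : Int) * (i : Int) ≠ (n : Int) ∧ (i : Int) ≤ 50
     then PySem.Int.floordiv (n : Int) (i : Int) * 11 else 0) = pvTermA n i := by
  obtain ⟨h1, h2⟩ := pvCondCast n i
  rw [h2, pvTermA]
  congr 1
  · refine if_congr ?_ rfl rfl
    rw [h1]
    constructor
    · rintro ⟨hd, hle⟩; exact ⟨hd, by exact_mod_cast hle⟩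
    · rintro ⟨hd, hle⟩; exact ⟨hd, by exact_mod_cast hle⟩
  · refine if_congr ?_ rfl rfl
    rw [h1]
    constructor
    · rintro ⟨hd, hne, hle⟩
      refine ⟨hd, ?_, by exact_mod_cast hle⟩
      intro h; apply hne
      rw [← h]; push_cast; ring
    · rintro ⟨hd, hne, hle⟩
      refine ⟨hd, ?_, by exact_mod_cast hle⟩
      intro h; exact hne (by exact_mod_cast h)

lemma pvA_char (n : Nat) :
    calculate_limited_presents_py (n : Int) = ∑ i ∈ Finset.Ico 1 (Nat.sqrt n + 1), pvTermA n i := by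
  unfold calculate_limited_presents_py
  rw [Int.toNat_natCast]
  have hfun : (fun (presents i : Int) =>
      let presents := if PySem.Int.mod (n : Int) i = 0 ∧ PySem.Int.floordiv (n : Int) i ≤ 50
                      then presents + i * 11 else presents
      if PySem.Int.mod (n : Int) i = 0 ∧ i * i ≠ (n : Int) ∧ i ≤ 50
      then presents + PySem.Int.floordiv (n : Int) i * 11 else presents)
    = (fun (presents i : Int) =>
        presents +
        ((if PySem.Int.mod (n : Int) i = 0 ∧ PySem.Int.floordiv (n : Int) i ≤ 50
          then i * 11 else 0) +
         (if PySem.Int.mod (n : Int) i = 0 ∧ i * i ≠ (n : Int) ∧ i ≤ 50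
          then PySem.Int.floordiv (n : Int) i * 11 else 0))) := by
    funext acc i; dsimp only; split_ifs <;> ring
  rw [hfun, PySem.List.foldl_add, PySem.List.pyRange_one]
  have hlen : (((Nat.sqrt n : Nat) : Int) + 1 - 1).toNat = Nat.sqrt n := by omega
  rw [hlen, List.map_map, zero_add]
  have hsum : ((List.range (Nat.sqrt n)).map
        ((fun i : Int =>
          (if PySem.Int.mod (n : Int) i = 0 ∧ PySem.Int.floordiv (n : Int) i ≤ 50
           then i * 11 else 0) +
          (if PySem.Int.mod (n : Int) i = 0 ∧ i * i ≠ (n : Int) ∧ i ≤ 50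
           then PySem.Int.floordiv (n : Int) i * 11 else 0)) ∘ fun k : Nat => (1 : Int) + k)).sum
      = ∑ k ∈ Finset.range (Nat.sqrt n), pvTermA n (1 + k) := by
    show _ = ((List.range (Nat.sqrt n)).map (fun k => pvTermA n (1 + k))).sum
    congr 1
    apply List.map_congr_left
    intro k _
    have hcast : ((1 : Int) + (k : Int)) = ((1 + k : Nat) : Int) := by push_cast; ring
    simp only [Function.comp, hcast]
    exact pvTermA_cast n (1 + k)
  rw [hsum, Finset.sum_Ico_eq_sum_range]
  simp

lemma pvB_char (n : Nat) :
    calculate_limited_presents_py_alt (n : Int) = ∑ c ∈ Finset.Ico 1 51, pvTermB n c := by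
  unfold calculate_limited_presents_py_alt
  have hfun : (fun (presents cofactor : Int) =>
      if PySem.Int.mod (n : Int) cofactor = 0
      then presents + PySem.Int.floordiv (n : Int) cofactor * 11 else presents)
    = (fun (presents cofactor : Int) =>
        presents + (if PySem.Int.mod (n : Int) cofactor = 0
                    then PySem.Int.floordiv (n : Int) cofactor * 11 else 0)) := by
    funext acc c; split_ifs <;> ring
  rw [hfun, PySem.List.foldl_add, PySem.List.pyRange_one]
  have hlen : ((51 : Int) - 1).toNat = 50 := by decide
  rw [hlen, List.map_map, zero_add]
  have hsum : ((List.range 50).map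
        ((fun c : Int => if PySem.Int.mod (n : Int) c = 0
                         then PySem.Int.floordiv (n : Int) c * 11 else 0) ∘ fun k : Nat => (1 : Int) + k)).sum
      = ∑ k ∈ Finset.range 50, pvTermB n (1 + k) := by
    show _ = ((List.range 50).map (fun k => pvTermB n (1 + k))).sum
    congr 1
    apply List.map_congr_left
    intro k _
    have hcast : ((1 : Int) + (k : Int)) = ((1 + k : Nat) : Int) := by push_cast; ring
    obtain ⟨h1, h2⟩ := pvCondCast n (1 + k)
    simp only [Function.comp, hcast, h2, pvTermB]
    exact if_congr h1 rfl rfl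
  rw [hsum, Finset.sum_Ico_eq_sum_range]

lemma pvFilterIco (n : Nat) (hn : n ≠ 0) :
    (Finset.Ico 1 (Nat.sqrt n + 1)).filter (fun d => d ∣ n)
      = n.divisors.filter (fun d => d * d ≤ n) := by
  ext d
  simp only [Finset.mem_filter, Finset.mem_Ico, Nat.mem_divisors, Nat.lt_succ_iff, Nat.le_sqrt]
  constructor
  · rintro ⟨⟨h1, h2⟩, h3⟩; exact ⟨⟨h3, hn⟩, h2⟩
  · rintro ⟨⟨h1, _⟩, h2⟩
    have : d ≠ 0 := by rintro rfl; exact hn (Nat.eq_zero_of_zero_dvd h1)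
    exact ⟨⟨by omega, h2⟩, h1⟩

lemma pvSqFlip (n d : Nat) (hd : d ∣ n) (hn : n ≠ 0) : d * d < n ↔ n < (n / d) * (n / d) := by
  obtain ⟨e, rfl⟩ := hd
  have hd0 : d ≠ 0 := by rintro rfl; simp at hn
  have he0 : e ≠ 0 := by rintro rfl; simp at hn
  rw [Nat.mul_div_cancel_left e (Nat.pos_of_ne_zero hd0)]
  constructor <;> intro h <;> nlinarith [Nat.pos_of_ne_zero hd0, Nat.pos_of_ne_zero he0]

lemma pvKey (n : Nat) :
    ∑ i ∈ Finset.Ico 1 (Nat.sqrt n + 1), pvTermA n i = ∑ c ∈ Finset.Ico 1 51, pvTermB n c := by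
  by_cases hn : n = 0
  · subst hn; decide
  -- B's sum over cofactors 1..50 as a sum over all divisors
  have hdiv1 := Nat.sum_div_divisors (α := ℤ) n (fun d => if n / d ≤ 50 then (d : Int) * 11 else 0)
  beta_reduce at hdiv1
  have hB : ∑ c ∈ Finset.Ico 1 51, pvTermB n c
      = ∑ d ∈ n.divisors, (if n / d ≤ 50 then (d : Int) * 11 else 0) := by
    have h1 : ∑ c ∈ Finset.Ico 1 51, pvTermB n c
        = ∑ c ∈ (Finset.Ico 1 51).filter (fun c => c ∣ n), ((n / c : Nat) : Int) * 11 := by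
      rw [Finset.sum_filter]; rfl
    have hset : (Finset.Ico 1 51).filter (fun c => c ∣ n)
        = n.divisors.filter (fun c => c ≤ 50) := by
      ext c
      simp only [Finset.mem_filter, Finset.mem_Ico, Nat.mem_divisors]
      constructor
      · rintro ⟨⟨ha, hb⟩, hc⟩; exact ⟨⟨hc, hn⟩, by omega⟩
      · rintro ⟨⟨ha, _⟩, hb⟩
        have : c ≠ 0 := by rintro rfl; exact hn (Nat.eq_zero_of_zero_dvd ha)
        exact ⟨⟨by omega, by omega⟩, ha⟩
    rw [h1, hset, Finset.sum_filter, ← hdiv1]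
    apply Finset.sum_congr rfl
    intro c hc
    rw [Nat.mem_divisors] at hc
    rw [Nat.div_div_self hc.1 hn]
  -- A's sum over 1..sqrt n as two sums over divisors
  have hA1 : ∑ i ∈ Finset.Ico 1 (Nat.sqrt n + 1), (if i ∣ n ∧ n / i ≤ 50 then (i : Int) * 11 else 0)
      = ∑ d ∈ n.divisors.filter (fun d => d * d ≤ n), (if n / d ≤ 50 then (d : Int) * 11 else 0) := by
    rw [Finset.sum_congr rfl (fun i _ => ite_and (i ∣ n) (n / i ≤ 50) ((i : Int) * 11) 0),
        ← Finset.sum_filter, pvFilterIco n hn]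
  have hA2 : ∑ i ∈ Finset.Ico 1 (Nat.sqrt n + 1),
        (if i ∣ n ∧ i * i ≠ n ∧ i ≤ 50 then ((n / i : Nat) : Int) * 11 else 0)
      = ∑ d ∈ n.divisors, (if d * d < n ∧ d ≤ 50 then ((n / d : Nat) : Int) * 11 else 0) := by
    rw [Finset.sum_congr rfl
          (fun i _ => ite_and (i ∣ n) (i * i ≠ n ∧ i ≤ 50) (((n / i : Nat) : Int) * 11) 0),
        ← Finset.sum_filter, pvFilterIco n hn, Finset.sum_filter]
    apply Finset.sum_congr rfl
    intro d _
    split_ifs <;> first | rfl | omega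
  -- match the 'large divisor' halves via d ↦ n / d
  have hdiv2 := Nat.sum_div_divisors (α := ℤ) n
      (fun d => if n < d * d ∧ n / d ≤ 50 then (d : Int) * 11 else 0)
  beta_reduce at hdiv2
  have hA2' : ∑ d ∈ n.divisors, (if d * d < n ∧ d ≤ 50 then ((n / d : Nat) : Int) * 11 else 0)
      = ∑ d ∈ n.divisors.filter (fun d => ¬ d * d ≤ n), (if n / d ≤ 50 then (d : Int) * 11 else 0) := by
    calc ∑ d ∈ n.divisors, (if d * d < n ∧ d ≤ 50 then ((n / d : Nat) : Int) * 11 else 0)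
        = ∑ d ∈ n.divisors,
            (if n < (n / d) * (n / d) ∧ n / (n / d) ≤ 50 then ((n / d : Nat) : Int) * 11 else 0) := by
          apply Finset.sum_congr rfl
          intro c hc
          rw [Nat.mem_divisors] at hc
          rw [Nat.div_div_self hc.1 hn]
          have hflip := pvSqFlip n c hc.1 hn
          split_ifs <;> first | rfl | omega
      _ = ∑ d ∈ n.divisors, (if n < d * d ∧ n / d ≤ 50 then (d : Int) * 11 else 0) := hdiv2
      _ = ∑ d ∈ n.divisors,
            (if ¬ d * d ≤ n then (if n / d ≤ 50 then (d : Int) * 11 else 0) else 0) := by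
          apply Finset.sum_congr rfl
          intro d _
          split_ifs <;> first | rfl | omega
      _ = ∑ d ∈ n.divisors.filter (fun d => ¬ d * d ≤ n), (if n / d ≤ 50 then (d : Int) * 11 else 0) :=
          (Finset.sum_filter _ _).symm
  calc ∑ i ∈ Finset.Ico 1 (Nat.sqrt n + 1), pvTermA n i
      = ∑ i ∈ Finset.Ico 1 (Nat.sqrt n + 1), (if i ∣ n ∧ n / i ≤ 50 then (i : Int) * 11 else 0)
        + ∑ i ∈ Finset.Ico 1 (Nat.sqrt n + 1),
            (if i ∣ n ∧ i * i ≠ n ∧ i ≤ 50 then ((n / i : Nat) : Int) * 11 else 0) := by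
        rw [← Finset.sum_add_distrib]; rfl
    _ = ∑ d ∈ n.divisors.filter (fun d => d * d ≤ n), (if n / d ≤ 50 then (d : Int) * 11 else 0)
        + ∑ d ∈ n.divisors.filter (fun d => ¬ d * d ≤ n), (if n / d ≤ 50 then (d : Int) * 11 else 0) := by
        rw [hA1, hA2, hA2']
    _ = ∑ d ∈ n.divisors, (if n / d ≤ 50 then (d : Int) * 11 else 0) :=
        Finset.sum_filter_add_sum_filter_not n.divisors _ _
    _ = ∑ c ∈ Finset.Ico 1 51, pvTermB n c := hB.symm

-- ===== VERDICT (by name: the statement is the Claim_ definition above) =====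
theorem calculate_limited_presents_py_spec : Claim_equal_calculate_limited_presents_py := by
  intro house _ hpre
  have h0 : 0 ≤ house := hpre
  lift house to ℕ using h0
  show calculate_limited_presents_py _ = _
  rw [pvA_char, pvB_char, pvKey]
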